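-- pv_equiv track=rewrite | github.com/SongyouZhong/aidd-platform | app/scheduler/docking_result_processor.py | _find_maegz_file
-- ===== SOURCE A (Python) =====
-- from typing import Dict, List, Optional, Tuple
--
-- def _find_maegz_file(output_files: List[str]) -> Optional[str]:
--     """从 output_files 找到 maegz 结构文件（top-1 pose 优先）"""
--     # 优先找 top-1 pose 文件（_pv_1p.maegz）
--     for f in output_files:
--         if "_pv_1p.maegz" in f:
--             return f
--     # 回退: 找任意 maegz
--     for f in output_files:
--         if f.endswith(".maegz"):
--             return f
--     return None
-- ===== SOURCE B (Python) =====
-- from typing import List, Optional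
--
-- def _find_maegz_file(output_files: List[str]) -> Optional[str]:
--     """Single pass: return first _pv_1p.maegz immediately; remember first plain .maegz as fallback."""
--     fallback = None
--     for f in output_files:
--         if "_pv_1p.maegz" in f:
--             return f
--         if fallback is None and f.endswith(".maegz"):
--             fallback = f
--     return fallback
-- ===== Notes on version B (the rewrite author's own statement) =====
-- stated objective: simpler
-- what changed: Replaced A's two sequential scans by one single pass that returns a _pv_1p.maegz hit immediately and keeps the first plain .maegz as an explicit fallback.
import Mathlib
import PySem

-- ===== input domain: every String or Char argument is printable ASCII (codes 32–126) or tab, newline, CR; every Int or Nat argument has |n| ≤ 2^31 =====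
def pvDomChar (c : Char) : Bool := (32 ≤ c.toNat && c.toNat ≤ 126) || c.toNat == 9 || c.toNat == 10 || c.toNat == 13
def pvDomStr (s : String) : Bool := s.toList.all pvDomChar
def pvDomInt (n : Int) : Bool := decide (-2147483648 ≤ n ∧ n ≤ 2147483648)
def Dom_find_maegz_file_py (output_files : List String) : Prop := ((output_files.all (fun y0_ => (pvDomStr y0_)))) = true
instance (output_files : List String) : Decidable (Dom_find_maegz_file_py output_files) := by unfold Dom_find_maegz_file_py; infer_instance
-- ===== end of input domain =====

-- ===== PORT A =====
-- First loop of A: first file containing "_pv_1p.maegz"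
def pvALoop1 : List String → Option String
  | [] => none
  | f :: rest => if PySem.Str.isIn "_pv_1p.maegz" f then some f else pvALoop1 rest

-- Second loop of A: first file ending with ".maegz"
def pvALoop2 : List String → Option String
  | [] => none
  | f :: rest => if PySem.Str.endswith f ".maegz" then some f else pvALoop2 rest

def find_maegz_file_py (output_files : List String) : Option String :=
  match pvALoop1 output_files with
  | some f => some f
  | none => pvALoop2 output_files

-- ===== PORT B =====
-- B: one pass with an explicit fallback accumulator (one honest line: simpler single-pass decomposition)
def pvBGo : List String → Option String → Option String
  | [], fallback => fallback
  | f :: rest, fallback =>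
      if PySem.Str.isIn "_pv_1p.maegz" f then some f
      else pvBGo rest (if fallback.isNone && PySem.Str.endswith f ".maegz" then some f else fallback)

def find_maegz_file_py_alt (output_files : List String) : Option String :=
  pvBGo output_files none

-- ===== PRECONDITION & SPEC =====
def Spec_find_maegz_file_py (output_files : List String) (out : Option String) : Prop := out = find_maegz_file_py_alt output_files
instance (output_files : List String) (out : Option String) : Decidable (Spec_find_maegz_file_py output_files out) := by unfold Spec_find_maegz_file_py; infer_instance

-- ===== CLAIM (what is proved, stated in full; the proofs are below) =====
def Claim_equal_find_maegz_file_py : Prop := ∀ (output_files : List String), Dom_find_maegz_file_py output_files → Spec_find_maegz_file_py output_files (find_maegz_file_py output_files)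

-- ===== LEMMAS AND PROOFS =====

-- ===== VERDICT (by name: the statement is the Claim_ definition above) =====
lemma pvBGo_eq (xs : List String) (fb : Option String) :
    pvBGo xs fb = match pvALoop1 xs with
      | some f => some f
      | none => match fb with | some g => some g | none => pvALoop2 xs := by
  induction xs generalizing fb with
  | nil => cases fb <;> simp [pvBGo, pvALoop1, pvALoop2]
  | cons f rest ih =>
      simp only [pvBGo, pvALoop1, pvALoop2]
      by_cases h1 : PySem.Str.isIn "_pv_1p.maegz" f = true
      · rw [if_pos h1, if_pos h1]
      · rw [if_neg h1, if_neg h1, ih]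
        cases fb with
        | some g => rfl
        | none =>
            simp only [Option.isNone_none, Bool.true_and]
            by_cases h2 : PySem.Str.endswith f ".maegz" = true
            · rw [if_pos h2, if_pos h2]
            · rw [if_neg h2, if_neg h2]

theorem find_maegz_file_py_spec : Claim_equal_find_maegz_file_py := by
  intro xs _
  unfold Spec_find_maegz_file_py find_maegz_file_py find_maegz_file_py_alt
  rw [pvBGo_eq]
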